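-- pv_equiv track=rewrite | github.com/ayhem18/Towards_SE | ProblemSolving/Python/file2.py | f_eff
-- ===== SOURCE A (Python) =====
-- from typing import List, Tuple
--
-- def calibrate(a: List[int], b:List[int]) -> Tuple[List[int]]:
--     n1, n2 = len(a), len(b)
--     max_len = max(n1, n2)
--     if len(a) != max_len:
--         a = a + [0 for _ in range(max_len - n1)]
--
--     if len(b) != max_len:
--         b = b + [0 for _ in range(max_len - n2)]
--
--     return a, b
--
-- def trim(a: List[int]) -> List[int]:
--     n1 = len(a)
--     i1 = 0
--     for i in range(n1 - 1, -1, -1):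
--         if a[i] != 0:
--             i1 = i
--             break
--
--     return a[:i1 + 1]
--
-- def f_eff(a: List[int], b: List[int]) -> List[int]:
--     # calibrate
--     a, b = calibrate(a, b)
--
--     if a == b:
--         return a
--
--     n = len(a)
--     res = [0 for _ in range(n)]
--     # find the most significant position in 'a'
--
--     a_index = None
--     for i in range(n - 1, -1, -1):
--         if a[i] != 0:
--             a_index = i
--             break
--
--
--     if a_index is None:
--         # this mean 'a' is zero
--         # the result will also be zero
--         return trim(res)
--
--
--     b_index = None
--     for i in range(n - 1, -1, -1):
--         if b[i] != 0:
--             b_index = i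
--             break
--
--
--     if b_index is None:
--         # this mean 'a' is zero
--         # the result will also be zero
--         return trim(res)
--
--
--     if b_index != a_index:
--         return trim(res)
--
--     i = b_index
--     while a[i] == b[i]:
--         res[i] = a[i]
--         i -= 1
--
--     # at this point we know that a[i] != b[i] (no need to worry about i going out of bounds, since a != b)
--     res[i] = a[i]
--     # the rest of the indices have to be 0
--     return trim(res)
-- ===== SOURCE B (Python) =====
-- from typing import List
--
-- def f_eff(a: List[int], b: List[int]) -> List[int]:
--     # Work in big-endian order: reverse the padded arrays, find the length p of
--     # their common prefix with a single forward scan, then strip the prefix's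
--     # leading zeros; the answer is assembled directly by concatenation.
--     m = max(len(a), len(b))
--     A = (a + [0] * (m - len(a)))[::-1]
--     B = (b + [0] * (m - len(b)))[::-1]
--     if A == B:
--         return A[::-1]
--     p = 0
--     while A[p] == B[p]:
--         p += 1
--     z = 0
--     while z < p and A[z] == 0:
--         z += 1
--     if z == p and (A[p] == 0 or B[p] == 0):
--         # the most significant nonzero digits sit at different positions
--         return [0]
--     # shared top digit at big-endian index z; keep digits z..p of A (the digit
--     # at the first mismatch is taken from a), lower positions are zero
--     return [0] * (m - 1 - p) + A[z:p + 1][::-1]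
-- ===== Notes on version B (the rewrite author's own statement) =====
-- stated objective: alternative
-- what changed: B works in big-endian order: it reverses the padded arrays, finds the common-prefix length with one forward scan and the prefix's leading-zero count with another, and assembles the answer by concatenation, instead of A's two separate downward top-nonzero scans, downward while-loop mutating a zero buffer, and a final trim pass.
import Mathlib
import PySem

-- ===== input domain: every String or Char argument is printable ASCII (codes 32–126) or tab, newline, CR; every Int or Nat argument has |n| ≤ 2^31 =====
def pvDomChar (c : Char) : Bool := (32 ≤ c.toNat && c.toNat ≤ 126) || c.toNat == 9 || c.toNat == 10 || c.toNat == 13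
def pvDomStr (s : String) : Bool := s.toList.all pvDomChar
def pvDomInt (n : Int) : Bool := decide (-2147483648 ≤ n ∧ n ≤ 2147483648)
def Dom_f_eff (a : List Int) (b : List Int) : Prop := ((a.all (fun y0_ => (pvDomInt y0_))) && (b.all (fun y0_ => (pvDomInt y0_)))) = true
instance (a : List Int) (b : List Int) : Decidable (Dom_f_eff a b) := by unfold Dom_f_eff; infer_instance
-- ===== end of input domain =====

-- B recasts the computation in big-endian order: a forward common-prefix scan over the
-- reversed padded arrays replaces A's downward scans, mutated buffer and trim (objective: alternative).

-- ===== PORT A =====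

-- pad x with trailing zeros up to length m  (Python: x + [0 for _ in range(m - len(x))])
def pvPad (x : List Int) (m : Nat) : List Int := x ++ List.replicate (m - x.length) 0

-- calibrate(a, b)
def pvCalibrate (a b : List Int) : List Int × List Int :=
  (pvPad a (max a.length b.length), pvPad b (max a.length b.length))

-- the downward loop of trim: first i in range(n-1,-1,-1) with a[i] != 0, else 0
def pvTrimIdx (x : List Int) : List Nat → Nat
  | [] => 0
  | i :: rest => if x.getD i 0 ≠ 0 then i else pvTrimIdx x rest

-- trim(a)
def pvTrim (x : List Int) : List Int :=
  x.take (pvTrimIdx x ((List.range x.length).reverse) + 1)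

-- the two index-finding loops of f_eff: first i downward with x[i] != 0 (None if absent)
def pvFindTop (x : List Int) : List Nat → Option Nat
  | [] => none
  | i :: rest => if x.getD i 0 ≠ 0 then some i else pvFindTop x rest

-- the while loop: while a[i]==b[i]: res[i]=a[i]; i-=1; then res[i]=a[i].
-- In A this loop is only entered with a guaranteed mismatch at some index ≤ i
-- (since a ≠ b with equal tops), so i never reaches -1; the i = 0 equal case
-- below is unreachable on A's calls.
def pvWhile (x y : List Int) : List Int → Nat → List Int
  | res, 0 => res.set 0 (x.getD 0 0)
  | res, j + 1 =>
    if x.getD (j+1) 0 = y.getD (j+1) 0 then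
      pvWhile x y (res.set (j+1) (x.getD (j+1) 0)) j
    else res.set (j+1) (x.getD (j+1) 0)

def f_eff (a : List Int) (b : List Int) : List Int :=
  let ab := pvCalibrate a b
  let A := ab.1
  let B := ab.2
  if A = B then A
  else
    let n := A.length
    let res := List.replicate n 0
    match pvFindTop A ((List.range n).reverse) with
    | none => pvTrim res
    | some ai =>
      match pvFindTop B ((List.range n).reverse) with
      | none => pvTrim res
      | some bi =>
        if bi ≠ ai then pvTrim res
        else pvTrim (pvWhile A B res bi)

-- ===== PORT B =====

-- p = 0; while A[p] == B[p]: p += 1   (a mismatch exists when called, so the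
-- scan stops strictly inside both lists; recursion on the lists is the natural
-- rendering of the forward index walk)
def pvFirstDiff : List Int → List Int → Nat
  | x :: xs, y :: ys => if x = y then pvFirstDiff xs ys + 1 else 0
  | _, _ => 0

-- z = 0; while z < p and A[z] == 0: z += 1
def pvLeadZeros : Nat → List Int → Nat
  | 0, _ => 0
  | _ + 1, [] => 0
  | p + 1, x :: xs => if x = 0 then pvLeadZeros p xs + 1 else 0

def f_eff_alt (a : List Int) (b : List Int) : List Int :=
  let m := max a.length b.length
  let A := (a ++ List.replicate (m - a.length) 0).reverse
  let B := (b ++ List.replicate (m - b.length) 0).reverse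
  if A = B then A.reverse
  else
    let p := pvFirstDiff A B
    let z := pvLeadZeros p A
    if z = p ∧ (A.getD p 0 = 0 ∨ B.getD p 0 = 0) then [0]
    else List.replicate (m - 1 - p) 0 ++
      (PySem.List.slice A (some (z : Int)) (some ((p : Int) + 1))).reverse

-- ===== PRECONDITION & SPEC =====
def Spec_f_eff (a : List Int) (b : List Int) (out : List Int) : Prop := out = f_eff_alt a b
instance (a : List Int) (b : List Int) (out : List Int) : Decidable (Spec_f_eff a b out) := by unfold Spec_f_eff; infer_instance

-- ===== CLAIM (what is proved, stated in full; the proofs are below) =====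
def Claim_equal_f_eff : Prop := ∀ (a : List Int) (b : List Int), Dom_f_eff a b → Spec_f_eff a b (f_eff a b)

-- ===== LEMMAS AND PROOFS =====

-- getD facts used throughout
theorem pv_getD_set (l : List Int) (i j : Nat) (v : Int) :
    (l.set i v).getD j 0 = if i = j ∧ i < l.length then v else l.getD j 0 := by
  simp only [List.getD, List.getElem?_set]
  split_ifs with h1 h2 <;> simp_all <;> omega

theorem pv_getD_replicate (n p : Nat) : (List.replicate n (0:Int)).getD p 0 = 0 := by
  simp only [List.getD, List.getElem?_replicate]
  split_ifs <;> simp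

theorem pv_eq_of_getD (x y : List Int) (hlen : x.length = y.length)
    (h : ∀ j, x.getD j 0 = y.getD j 0) : x = y := by
  apply List.ext_getElem hlen
  intro i hi hi'
  have := h i
  rwa [List.getD_eq_getElem x 0 hi, List.getD_eq_getElem y 0 hi'] at this

theorem pv_getD_oob (l : List Int) (i : Nat) (h : l.length ≤ i) : l.getD i 0 = 0 := by
  simp only [List.getD]
  rw [List.getElem?_eq_none h]
  rfl

theorem pv_rev_getD (x : List Int) (i : Nat) (h : i < x.length) :
    x.reverse.getD i 0 = x.getD (x.length - 1 - i) 0 := by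
  rw [List.getD_eq_getElem x.reverse 0 (by simpa using h), List.getElem_reverse,
      List.getD_eq_getElem x 0 (by omega)]

-- pvFindTop characterisation (scanning [i, i-1, …, 0])
theorem pvFindTop_none (x : List Int) (i : Nat)
    (h : pvFindTop x ((List.range (i+1)).reverse) = none) :
    ∀ j, j ≤ i → x.getD j 0 = 0 := by
  induction i with
  | zero =>
    intro j hj
    have hj0 : j = 0 := by omega
    subst hj0
    rw [show (List.range 1).reverse = [0] from rfl] at h
    simp only [pvFindTop] at h
    by_cases hx : x.getD 0 0 ≠ 0
    · rw [if_pos hx] at h; exact absurd h (by simp)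
    · push_neg at hx; exact hx
  | succ i ih =>
    intro j hj
    rw [List.range_succ, List.reverse_append] at h
    simp only [List.reverse_singleton, List.singleton_append, pvFindTop] at h
    by_cases hx : x.getD (i+1) 0 ≠ 0
    · rw [if_pos hx] at h; exact absurd h (by simp)
    · rw [if_neg hx] at h
      push_neg at hx
      rcases Nat.lt_or_ge j (i+1) with hlt | hge
      · exact ih h j (by omega)
      · have : j = i + 1 := by omega
        subst this; exact hx

theorem pvFindTop_some (x : List Int) (i t : Nat)
    (h : pvFindTop x ((List.range (i+1)).reverse) = some t) :
    t ≤ i ∧ x.getD t 0 ≠ 0 ∧ ∀ j, t < j → j ≤ i → x.getD j 0 = 0 := by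
  induction i with
  | zero =>
    rw [show (List.range 1).reverse = [0] from rfl] at h
    simp only [pvFindTop] at h
    by_cases hx : x.getD 0 0 ≠ 0
    · rw [if_pos hx] at h
      have ht0 : t = 0 := by simpa using h.symm
      subst ht0
      exact ⟨le_refl 0, hx, by omega⟩
    · rw [if_neg hx] at h; exact absurd h (by simp)
  | succ i ih =>
    rw [List.range_succ, List.reverse_append] at h
    simp only [List.reverse_singleton, List.singleton_append, pvFindTop] at h
    split_ifs at h with hx
    · simp at h; subst h
      exact ⟨le_refl _, hx, by omega⟩
    · obtain ⟨h1, h2, h3⟩ := ih h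
      refine ⟨by omega, h2, ?_⟩
      intro j hj1 hj2
      rcases Nat.lt_or_ge j (i+1) with hlt | hge
      · exact h3 j hj1 (by omega)
      · have : j = i + 1 := by omega
        subst this; simpa using hx

-- pvFirstDiff stops exactly at the first index where the lists differ
theorem pvFirstDiff_eq (u v : List Int) (p : Nat)
    (hu : p < u.length) (hv : p < v.length)
    (hpre : ∀ i, i < p → u.getD i 0 = v.getD i 0)
    (hne : u.getD p 0 ≠ v.getD p 0) :
    pvFirstDiff u v = p := by
  induction u generalizing v p with
  | nil => simp at hu
  | cons x xs ih =>
    cases v with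
    | nil => simp at hv
    | cons y ys =>
      cases p with
      | zero =>
        simp only [List.getD_cons_zero] at hne
        simp [pvFirstDiff, hne]
      | succ p =>
        have hxy : x = y := by simpa using hpre 0 (by omega)
        simp only [pvFirstDiff, if_pos hxy]
        rw [ih ys p (by simpa using hu) (by simpa using hv)
          (fun i hi => by simpa using hpre (i+1) (by omega))
          (by simpa using hne)]

-- pvLeadZeros stops exactly at the first nonzero position (or at p)
theorem pvLeadZeros_eq (u : List Int) (p z : Nat)
    (hz : z ≤ p) (hp : p ≤ u.length)
    (h0 : ∀ i, i < z → u.getD i 0 = 0)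
    (hnz : z < p → u.getD z 0 ≠ 0) :
    pvLeadZeros p u = z := by
  induction u generalizing p z with
  | nil =>
    have : p = 0 := by simpa using hp
    subst this
    have : z = 0 := by omega
    subst this; rfl
  | cons x xs ih =>
    cases p with
    | zero =>
      have : z = 0 := by omega
      subst this; rfl
    | succ p =>
      cases z with
      | zero =>
        have hx : x ≠ 0 := by simpa using hnz (by omega)
        simp [pvLeadZeros, hx]
      | succ z =>
        have hx : x = 0 := by simpa using h0 0 (by omega)
        simp only [pvLeadZeros, if_pos hx]
        rw [ih p z (by omega) (by simpa using hp)
          (fun i hi => by simpa using h0 (i+1) (by omega))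
          (fun h => by simpa using hnz (by omega))]

-- pvTrimIdx stops exactly at the highest nonzero index
theorem pvTrimIdx_eq (x : List Int) (i t : Nat) (ht : t ≤ i)
    (hnz : x.getD t 0 ≠ 0)
    (hab : ∀ j, t < j → j ≤ i → x.getD j 0 = 0) :
    pvTrimIdx x ((List.range (i+1)).reverse) = t := by
  induction i with
  | zero =>
    have : t = 0 := by omega
    subst this
    simp only [List.range_succ, List.range_zero, List.reverse_append]
    simp [pvTrimIdx]
  | succ i ih =>
    rw [List.range_succ, List.reverse_append]
    simp only [List.reverse_singleton, List.singleton_append, pvTrimIdx]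
    rcases Nat.lt_or_ge t (i+1) with hlt | hge
    · rw [if_neg (by simpa using hab (i+1) (by omega) (le_refl _))]
      exact ih (by omega) (fun j h1 h2 => hab j h1 (by omega))
    · have : t = i + 1 := by omega
      subst this
      rw [if_pos hnz]

theorem pvTrimIdx_eq' (x : List Int) (n t : Nat) (hn : 1 ≤ n) (ht : t ≤ n - 1)
    (hnz : x.getD t 0 ≠ 0)
    (hab : ∀ j, t < j → j ≤ n - 1 → x.getD j 0 = 0) :
    pvTrimIdx x ((List.range n).reverse) = t := by
  obtain ⟨i, rfl⟩ : ∃ i, n = i + 1 := ⟨n - 1, by omega⟩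
  exact pvTrimIdx_eq x i t (by omega) hnz (fun j h1 h2 => hab j h1 (by omega))

theorem pvTrimIdx_zeros (x : List Int) (idxs : List Nat)
    (h : ∀ j, x.getD j 0 = 0) : pvTrimIdx x idxs = 0 := by
  induction idxs with
  | nil => rfl
  | cons i rest ih =>
    simp only [pvTrimIdx]
    rw [if_neg (by simpa [List.getD] using h i)]
    exact ih

theorem pvTrim_zeros (n : Nat) (hn : 1 ≤ n) :
    pvTrim (List.replicate n (0:Int)) = [0] := by
  unfold pvTrim
  rw [pvTrimIdx_zeros _ _ (fun j => pv_getD_replicate n j)]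
  obtain ⟨m, rfl⟩ : ∃ m, n = m + 1 := ⟨n - 1, by omega⟩
  simp [List.replicate_succ]

-- the while loop fills positions k..t with x's digits and leaves the rest alone
theorem pvWhile_spec (x y : List Int) (t k : Nat) (res : List Int)
    (hlen : t < res.length) (hk : k ≤ t)
    (hmk : x.getD k 0 ≠ y.getD k 0)
    (hab : ∀ j, k < j → j ≤ t → x.getD j 0 = y.getD j 0) :
    (pvWhile x y res t).length = res.length ∧
    ∀ p, (pvWhile x y res t).getD p 0 =
      if k ≤ p ∧ p ≤ t then x.getD p 0 else res.getD p 0 := by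
  induction t generalizing res with
  | zero =>
    have : k = 0 := by omega
    subst this
    simp only [pvWhile]
    refine ⟨by simp, fun p => ?_⟩
    rw [pv_getD_set]
    by_cases hp : p = 0
    · subst hp
      rw [if_pos ⟨rfl, hlen⟩, if_pos ⟨le_refl _, le_refl _⟩]
    · rw [if_neg (fun hc => hp hc.1.symm), if_neg (fun hc => hp (by omega))]
  | succ t ih =>
    simp only [pvWhile]
    split_ifs with he
    · have hkt : k ≤ t := by
        rcases Nat.lt_or_ge k (t+1) with h | h
        · omega
        · have : k = t + 1 := by omega
          subst this; exact absurd he hmk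
      obtain ⟨l1, l2⟩ := ih (res.set (t+1) (x.getD (t+1) 0))
        (by rw [List.length_set]; omega) hkt
        (fun j h1 h2 => hab j h1 (by omega))
      refine ⟨by rw [l1, List.length_set], fun p => ?_⟩
      rw [l2 p, pv_getD_set]
      by_cases h1 : k ≤ p ∧ p ≤ t
      · rw [if_pos h1, if_pos ⟨h1.1, by omega⟩]
      · by_cases h2 : p = t + 1
        · subst h2
          rw [if_neg h1, if_pos ⟨rfl, hlen⟩, if_pos ⟨by omega, le_refl _⟩]
        · rw [if_neg h1, if_neg (fun hc => h2 hc.1.symm),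
              if_neg (fun hc => h1 ⟨hc.1, by omega⟩)]
    · have : k = t + 1 := by
        by_contra hne2
        exact he (hab (t+1) (by omega) (le_refl _))
      subst this
      refine ⟨by rw [List.length_set], fun p => ?_⟩
      rw [pv_getD_set]
      by_cases hp : p = t + 1
      · subst hp
        rw [if_pos ⟨rfl, hlen⟩, if_pos ⟨le_refl _, le_refl _⟩]
      · rw [if_neg (fun hc => hp hc.1.symm), if_neg (fun hc => hp (by omega))]

-- the highest mismatch below t exists when any mismatch below t does
theorem pv_exists_top_mismatch (x y : List Int) (t : Nat)
    (h : ∃ j, j ≤ t ∧ x.getD j 0 ≠ y.getD j 0) :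
    ∃ k, k ≤ t ∧ x.getD k 0 ≠ y.getD k 0 ∧
      ∀ j, k < j → j ≤ t → x.getD j 0 = y.getD j 0 := by
  induction t with
  | zero =>
    obtain ⟨j, hj, hne⟩ := h
    have : j = 0 := by omega
    subst this
    exact ⟨0, le_refl _, hne, by omega⟩
  | succ t ih =>
    by_cases he : x.getD (t+1) 0 = y.getD (t+1) 0
    · obtain ⟨j, hj, hne⟩ := h
      have hj' : j ≤ t := by
        rcases Nat.lt_or_ge j (t+1) with h' | h'
        · omega
        · have : j = t + 1 := by omega
          subst this; exact absurd he hne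
      obtain ⟨k, h1, h2, h3⟩ := ih ⟨j, hj', hne⟩
      refine ⟨k, by omega, h2, fun j' hj1 hj2 => ?_⟩
      rcases Nat.lt_or_ge j' (t+1) with h' | h'
      · exact h3 j' hj1 (by omega)
      · have : j' = t + 1 := by omega
        subst this; exact he
    · exact ⟨t+1, le_refl _, he, by omega⟩

theorem pvPad_length (x : List Int) (m : Nat) (h : x.length ≤ m) :
    (x ++ List.replicate (m - x.length) (0:Int)).length = m := by
  simp; omega

-- ===== VERDICT (by name: the statement is the Claim_ definition above) =====
theorem f_eff_spec : Claim_equal_f_eff := by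
  intro a b _
  unfold Spec_f_eff
  simp only [f_eff, f_eff_alt, pvCalibrate, pvPad]
  set m := max a.length b.length with hm
  set x := a ++ List.replicate (m - a.length) (0:Int) with hxdef
  set y := b ++ List.replicate (m - b.length) (0:Int) with hydef
  have hxl : x.length = m := by rw [hxdef]; exact pvPad_length a m (Nat.le_max_left _ _)
  have hyl : y.length = m := by rw [hydef]; exact pvPad_length b m (Nat.le_max_right _ _)
  by_cases hxy : x = y
  · rw [if_pos hxy, if_pos (by rw [hxy]), hxy, List.reverse_reverse]
  · have hrev : ¬ (x.reverse = y.reverse) := fun h => hxy (by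
      simpa using congrArg List.reverse h)
    rw [if_neg hxy, if_neg hrev]
    have hm1 : 1 ≤ m := by
      by_contra hc
      push_neg at hc
      apply hxy
      have hx0 : x = [] := List.eq_nil_of_length_eq_zero (by omega)
      have hy0 : y = [] := List.eq_nil_of_length_eq_zero (by omega)
      rw [hx0, hy0]
    have hmm : m - 1 + 1 = m := by omega
    obtain ⟨j0, hj0⟩ : ∃ j, x.getD j 0 ≠ y.getD j 0 := by
      by_contra hco
      push_neg at hco
      exact hxy (pv_eq_of_getD x y (by rw [hxl, hyl]) hco)
    have hj0m : j0 ≤ m - 1 := by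
      by_contra hgt
      push_neg at hgt
      exact hj0 (by rw [pv_getD_oob x j0 (by omega), pv_getD_oob y j0 (by omega)])
    -- the highest mismatch k and the resulting common-prefix length of the reversals
    obtain ⟨k, hk1, hk2, hk3⟩ := pv_exists_top_mismatch x y (m-1) ⟨j0, hj0m, hj0⟩
    have hfd : pvFirstDiff x.reverse y.reverse = m - 1 - k := by
      apply pvFirstDiff_eq _ _ _ (by simp [hxl]; omega) (by simp [hyl]; omega)
      · intro i hi
        rw [pv_rev_getD x i (by omega), pv_rev_getD y i (by omega), hxl, hyl]
        exact hk3 (m-1-i) (by omega) (by omega)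
      · rw [pv_rev_getD x _ (by omega), pv_rev_getD y _ (by omega), hxl, hyl]
        have : m - 1 - (m - 1 - k) = k := by omega
        rw [this]; exact hk2
    rw [hxl, hfd]
    cases hA : pvFindTop x ((List.range m).reverse) with
    | none =>
      have hA' := hA; rw [← hmm] at hA'
      have hxall := pvFindTop_none x (m-1) hA'
      cases hB : pvFindTop y ((List.range m).reverse) with
      | none =>
        have hB' := hB; rw [← hmm] at hB'
        have hyall := pvFindTop_none y (m-1) hB'
        exact absurd (pv_eq_of_getD x y (by rw [hxl, hyl]) (fun j => by
          rcases Nat.lt_or_ge j m with hj | hj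
          · rw [hxall j (by omega), hyall j (by omega)]
          · rw [pv_getD_oob x j (by omega), pv_getD_oob y j (by omega)])) hxy
      | some tb =>
        dsimp only []
        have hB' := hB; rw [← hmm] at hB'
        obtain ⟨htb, hynz, hyab⟩ := pvFindTop_some y (m-1) tb hB'
        -- k = tb here: x is all zero so mismatches are exactly y's nonzeros
        have hktb : k = tb := by
          rcases Nat.lt_trichotomy k tb with h | h | h
          · exact absurd (hk3 tb h htb) (by rw [hxall tb htb]; exact fun hh => hynz hh.symm)
          · exact h
          · exact absurd (by rw [hxall k hk1, hyab k h hk1]) hk2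
        have hlz : pvLeadZeros (m - 1 - k) x.reverse = m - 1 - k := by
          apply pvLeadZeros_eq _ _ _ (le_refl _) (by simp [hxl]; omega)
            (fun i hi => by rw [pv_rev_getD x i (by omega), hxl]; exact hxall _ (by omega))
            (fun h => absurd h (by omega))
        rw [hlz]
        rw [if_pos ⟨rfl, Or.inl (by
          rw [pv_rev_getD x _ (by simp [hxl]; omega), hxl]
          exact hxall _ (by omega))⟩]
        exact pvTrim_zeros m hm1
    | some ta =>
      have hA' := hA; rw [← hmm] at hA'
      obtain ⟨hta, hxnz, hxab⟩ := pvFindTop_some x (m-1) ta hA'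
      cases hB : pvFindTop y ((List.range m).reverse) with
      | none =>
        dsimp only []
        have hB' := hB; rw [← hmm] at hB'
        have hyall := pvFindTop_none y (m-1) hB'
        have hkta : k = ta := by
          rcases Nat.lt_trichotomy k ta with h | h | h
          · exact absurd (hk3 ta h hta) (by rw [hyall ta hta]; exact fun hh => hxnz hh)
          · exact h
          · exact absurd (by rw [hxab k h hk1, hyall k hk1]) hk2
        have hlz : pvLeadZeros (m - 1 - k) x.reverse = m - 1 - k := by
          apply pvLeadZeros_eq _ _ _ (le_refl _) (by simp [hxl]; omega)
            (fun i hi => by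
              rw [pv_rev_getD x i (by omega), hxl]
              exact hxab _ (by omega) (by omega))
            (fun h => absurd h (by omega))
        rw [hlz]
        rw [if_pos ⟨rfl, Or.inr (by
          rw [pv_rev_getD y _ (by simp [hyl]; omega), hyl]
          exact hyall _ (by omega))⟩]
        exact pvTrim_zeros m hm1
      | some tb =>
        have hB' := hB; rw [← hmm] at hB'
        dsimp only []
        obtain ⟨htb, hynz, hyab⟩ := pvFindTop_some y (m-1) tb hB'
        by_cases hteq : tb = ta
        · subst hteq
          rw [if_neg (show ¬(tb ≠ tb) by simp)]
          -- equal tops: k ≤ tb, leading zeros of the reversal stop at m-1-tb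
          have hktb : k ≤ tb := by
            by_contra hgt
            push_neg at hgt
            exact hk2 (by rw [hxab k hgt hk1, hyab k hgt hk1])
          have hlz : pvLeadZeros (m - 1 - k) x.reverse = m - 1 - tb := by
            apply pvLeadZeros_eq _ _ _ (by omega) (by simp [hxl]; omega)
              (fun i hi => by
                rw [pv_rev_getD x i (by omega), hxl]
                exact hxab _ (by omega) (by omega))
              (fun h => by
                rw [pv_rev_getD x _ (by omega), hxl]
                have : m - 1 - (m - 1 - tb) = tb := by omega
                rw [this]; exact hxnz)
          rw [hlz]
          rw [if_neg (by
            rintro ⟨hzp, hor⟩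
            have htbk : tb = k := by omega
            rcases hor with h | h
            · rw [pv_rev_getD x _ (by simp [hxl]; omega), hxl] at h
              have : m - 1 - (m - 1 - k) = k := by omega
              rw [this] at h
              exact hxnz (htbk ▸ h)
            · rw [pv_rev_getD y _ (by simp [hyl]; omega), hyl] at h
              have : m - 1 - (m - 1 - k) = k := by omega
              rw [this] at h
              exact hynz (htbk ▸ h))]
          -- both sides reduce to replicate k 0 ++ (x.take (tb+1)).drop k
          obtain ⟨hrl, hrg⟩ := pvWhile_spec x y tb k (List.replicate m 0)
            (by rw [List.length_replicate]; omega) hktb hk2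
            (fun j h1 h2 => hk3 j h1 (by omega))
          have htr : pvTrim (pvWhile x y (List.replicate m 0) tb) =
              (pvWhile x y (List.replicate m 0) tb).take (tb + 1) := by
            unfold pvTrim
            rw [hrl, List.length_replicate]
            rw [pvTrimIdx_eq' _ m tb hm1 htb
              (by rw [hrg tb, if_pos ⟨hktb, le_refl _⟩]; exact hxnz)
              (fun j h1 h2 => by
                rw [hrg j, if_neg (fun hc => by omega)]
                exact pv_getD_replicate m j)]
          rw [htr]
          -- simplify the slice of the reversal
          have hcast : ((m - 1 - k : Nat) : Int) + 1 = (((m - 1 - k + 1 : Nat)) : Int) := by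
            push_cast; ring
          rw [hcast, PySem.List.slice_natCast]
          have hdrop : x.reverse.drop (m - 1 - tb) = (x.take (tb + 1)).reverse := by
            rw [List.drop_reverse]
            congr 1
            rw [hxl]
            congr 1
            omega
          have hseg : ((x.reverse.drop (m - 1 - tb)).take (m - 1 - k + 1 - (m - 1 - tb))).reverse
              = (x.take (tb + 1)).drop k := by
            rw [hdrop, List.take_reverse, List.reverse_reverse]
            congr 1
            rw [List.length_take, hxl]
            omega
          rw [hseg]
          have hmk : m - 1 - (m - 1 - k) = k := by omega
          rw [hmk]
          apply List.ext_getElem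
          · simp only [List.length_take, List.length_append, List.length_replicate,
              List.length_drop, hrl, List.length_replicate, hxl]
            omega
          · intro i h1 h2
            have hiL : i < (pvWhile x y (List.replicate m 0) tb).length := by
              rw [hrl, List.length_replicate]
              rw [List.length_take, hrl, List.length_replicate] at h1
              omega
            have hitb : i ≤ tb := by
              rw [List.length_take, hrl, List.length_replicate] at h1
              omega
            rw [List.getElem_take, ← List.getD_eq_getElem _ 0 hiL, hrg i]
            rcases Nat.lt_or_ge i k with hik | hik
            · rw [if_neg (fun hc => by omega)]
              rw [List.getElem_append_left (by simpa using hik)]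
              rw [List.getElem_replicate]
              exact pv_getD_replicate m i
            · rw [if_pos ⟨hik, hitb⟩]
              rw [List.getElem_append_right (by simpa using hik)]
              simp only [List.length_replicate]
              rw [List.getElem_drop, List.getElem_take]
              rw [List.getD_eq_getElem x 0 (by rw [hxl]; omega)]
              congr 1
              omega
        · rw [if_pos hteq]
          rcases Nat.lt_or_ge ta tb with hlt | hge
          · -- x's top below y's: highest mismatch is tb, x is zero there
            have hktb : k = tb := by
              rcases Nat.lt_trichotomy k tb with h | h | h
              · exact absurd (hk3 tb h htb)
                  (by rw [hxab tb hlt htb]; exact fun hh => hynz hh.symm)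
              · exact h
              · exact absurd (by rw [hxab k (by omega) hk1, hyab k h hk1]) hk2
            have hlz : pvLeadZeros (m - 1 - k) x.reverse = m - 1 - k := by
              apply pvLeadZeros_eq _ _ _ (le_refl _) (by simp [hxl]; omega)
                (fun i hi => by
                  rw [pv_rev_getD x i (by omega), hxl]
                  exact hxab _ (by omega) (by omega))
                (fun h => absurd h (by omega))
            rw [hlz]
            rw [if_pos ⟨rfl, Or.inl (by
              rw [pv_rev_getD x _ (by simp [hxl]; omega), hxl]
              have : m - 1 - (m - 1 - k) = k := by omega
              rw [this, hktb]
              exact hxab tb hlt htb)⟩]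
            exact pvTrim_zeros m hm1
          · have hlt : tb < ta := by omega
            have hkta : k = ta := by
              rcases Nat.lt_trichotomy k ta with h | h | h
              · exact absurd (hk3 ta h hta)
                  (by rw [hyab ta hlt hta]; exact fun hh => hxnz hh)
              · exact h
              · exact absurd (by rw [hxab k h hk1, hyab k (by omega) hk1]) hk2
            have hlz : pvLeadZeros (m - 1 - k) x.reverse = m - 1 - k := by
              apply pvLeadZeros_eq _ _ _ (le_refl _) (by simp [hxl]; omega)
                (fun i hi => by
                  rw [pv_rev_getD x i (by omega), hxl]
                  exact hxab _ (by omega) (by omega))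
                (fun h => absurd h (by omega))
            rw [hlz]
            rw [if_pos ⟨rfl, Or.inr (by
              rw [pv_rev_getD y _ (by simp [hyl]; omega), hyl]
              have : m - 1 - (m - 1 - k) = k := by omega
              rw [this, hkta]
              exact hyab ta hlt hta)⟩]
            exact pvTrim_zeros m hm1
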